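-- pv_equiv track=rewrite | github.com/angr/patcherex | patcherex/backends/detourbackends/ppc_vle.py | generate_asm_jump_on_return_val
-- ===== SOURCE A (Python) =====
-- def generate_asm_jump_on_return_val(mapping):
--     asm = ""
--     for ret_val, jmp_addr in mapping.items():
--         asm += f"e_li r4, {ret_val}\n"
--         asm += f"cmp 0, r3, r4\n"
--         asm += f"e_beq _label_{str(ret_val).replace('-', '_')}\n"
--     asm += f"RESTORE_CONTEXT\n"
--     asm += f"e_b _end\n"
--     for ret_val, jmp_addr in mapping.items():
--         asm += f"_label_{str(ret_val).replace('-', '_')}:\n"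
--         asm += f"RESTORE_CONTEXT\n"
--         asm += f"e_b {hex(jmp_addr)}\n"
--     asm += f"_end:\n"
--     return asm
-- ===== SOURCE B (Python) =====
-- def generate_asm_jump_on_return_val(mapping):
--     compares = []
--     labels = []
--     for ret_val, jmp_addr in mapping.items():
--         label = str(ret_val).replace('-', '_')
--         compares.append(f"e_li r4, {ret_val}\ncmp 0, r3, r4\ne_beq _label_{label}\n")
--         labels.append(f"_label_{label}:\nRESTORE_CONTEXT\ne_b {hex(jmp_addr)}\n")
--     return "".join(compares) + "RESTORE_CONTEXT\ne_b _end\n" + "".join(labels) + "_end:\n"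
-- ===== Notes on version B (the rewrite author's own statement) =====
-- stated objective: alternative
-- what changed: Replaces A's two separate scans of mapping.items() with repeated string += by a single pass that appends each per-key compare line and label block to two list accumulators, then joins them around the fixed middle and end lines.
import Mathlib
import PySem

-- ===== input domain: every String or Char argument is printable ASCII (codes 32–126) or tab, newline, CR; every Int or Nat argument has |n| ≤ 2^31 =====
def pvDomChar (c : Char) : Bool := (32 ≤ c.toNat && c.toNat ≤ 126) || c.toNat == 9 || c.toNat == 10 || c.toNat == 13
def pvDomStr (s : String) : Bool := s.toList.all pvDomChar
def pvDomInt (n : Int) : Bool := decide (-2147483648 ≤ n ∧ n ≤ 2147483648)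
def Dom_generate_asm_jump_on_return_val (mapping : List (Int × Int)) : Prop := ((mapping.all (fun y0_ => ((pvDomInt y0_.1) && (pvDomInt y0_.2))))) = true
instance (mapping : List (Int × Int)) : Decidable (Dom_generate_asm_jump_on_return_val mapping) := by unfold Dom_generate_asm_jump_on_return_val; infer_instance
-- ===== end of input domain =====

-- One honest line: B makes one pass over mapping.items() collecting the compare lines and the
-- label blocks in two list accumulators and joins them, instead of A's two scans with string +=.

-- hex(n): hand port (no PySem primitive) — exact for Python's hex() on every Int
-- (lowercase digits via Nat.toDigits 16, '0x' prefix, '-0x' for negatives, hex(0) = "0x0").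
def pyHex (n : Int) : String :=
  if n < 0 then "-0x" ++ String.ofList (Nat.toDigits 16 (-n).toNat)
  else "0x" ++ String.ofList (Nat.toDigits 16 n.toNat)

-- ===== PORT A =====
def generate_asm_jump_on_return_val (mapping : List (Int × Int)) : String :=
  let items := (PySem.Dict.ofList mapping).items   -- mapping.items() of the dict
  let asm : String := ""
  let asm := items.foldl (fun asm p =>
    let asm := asm ++ ("e_li r4, " ++ PySem.Int.toStr p.1 ++ "\n")
    let asm := asm ++ "cmp 0, r3, r4\n"
    asm ++ ("e_beq _label_" ++ PySem.Str.replace (PySem.Int.toStr p.1) "-" "_" ++ "\n")) asm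
  let asm := asm ++ "RESTORE_CONTEXT\n"
  let asm := asm ++ "e_b _end\n"
  let asm := items.foldl (fun asm p =>
    let asm := asm ++ ("_label_" ++ PySem.Str.replace (PySem.Int.toStr p.1) "-" "_" ++ ":\n")
    let asm := asm ++ "RESTORE_CONTEXT\n"
    asm ++ ("e_b " ++ pyHex p.2 ++ "\n")) asm
  asm ++ "_end:\n"

-- ===== PORT B =====
def generate_asm_jump_on_return_val_alt (mapping : List (Int × Int)) : String :=
  let acc := (PySem.Dict.ofList mapping).items.foldl
    (fun (acc : List String × List String) p =>
      let label := PySem.Str.replace (PySem.Int.toStr p.1) "-" "_"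
      (acc.1 ++ ["e_li r4, " ++ PySem.Int.toStr p.1 ++ "\ncmp 0, r3, r4\ne_beq _label_" ++ label ++ "\n"],
       acc.2 ++ ["_label_" ++ label ++ ":\nRESTORE_CONTEXT\ne_b " ++ pyHex p.2 ++ "\n"]))
    ([], [])
  PySem.Str.join "" acc.1 ++ "RESTORE_CONTEXT\ne_b _end\n" ++ PySem.Str.join "" acc.2 ++ "_end:\n"

-- ===== PRECONDITION & SPEC =====
def Spec_generate_asm_jump_on_return_val (mapping : List (Int × Int)) (out : String) : Prop := out = generate_asm_jump_on_return_val_alt mapping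
instance (mapping : List (Int × Int)) (out : String) : Decidable (Spec_generate_asm_jump_on_return_val mapping out) := by unfold Spec_generate_asm_jump_on_return_val; infer_instance

-- ===== CLAIM (what is proved, stated in full; the proofs are below) =====
def Claim_equal_generate_asm_jump_on_return_val : Prop := ∀ (mapping : List (Int × Int)), Dom_generate_asm_jump_on_return_val mapping → Spec_generate_asm_jump_on_return_val mapping (generate_asm_jump_on_return_val mapping)

-- ===== LEMMAS AND PROOFS =====

-- a += loop appending three pieces per iteration, read on the character side
theorem toList_foldl_append3 {α : Type} (l : List α) (f g h : α → String) (init : String) :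
    (l.foldl (fun a p => a ++ f p ++ g p ++ h p) init).toList
      = init.toList ++ (l.map (fun p => (f p).toList ++ (g p).toList ++ (h p).toList)).flatten := by
  induction l generalizing init with
  | nil => simp
  | cons x xs ih => simp [List.foldl_cons, ih, String.toList_append]

-- "".join(parts), read on the character side
theorem toList_join_empty (l : List String) :
    (PySem.Str.join "" l).toList = (l.map String.toList).flatten := by
  simp [PySem.Str.join, PySem.Chars.join]
  induction l with
  | nil => simp [List.intercalate]
  | cons x xs ih => cases xs <;> simp_all [List.intercalate]

theorem generate_asm_jump_on_return_val_spec : Claim_equal_generate_asm_jump_on_return_val := by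
  intro mapping _
  show generate_asm_jump_on_return_val mapping = generate_asm_jump_on_return_val_alt mapping
  unfold generate_asm_jump_on_return_val generate_asm_jump_on_return_val_alt
  generalize (PySem.Dict.ofList mapping).items = l
  rw [PySem.List.foldl_prod_mk
        (f := fun a (p : Int × Int) => a ++ ["e_li r4, " ++ PySem.Int.toStr p.1 ++ "\ncmp 0, r3, r4\ne_beq _label_" ++ PySem.Str.replace (PySem.Int.toStr p.1) "-" "_" ++ "\n"])
        (g := fun a (p : Int × Int) => a ++ ["_label_" ++ PySem.Str.replace (PySem.Int.toStr p.1) "-" "_" ++ ":\nRESTORE_CONTEXT\ne_b " ++ pyHex p.2 ++ "\n"])]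
  simp only [PySem.List.foldl_append_singleton_eq_map, List.nil_append]
  apply String.ext
  simp only [toList_join_empty, List.map_map, String.toList_append,
    toList_foldl_append3]
  simp [String.toList_append, Function.comp_def]
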